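-- pv_equiv track=rewrite | github.com/AlgoBitConsulting/scatteringWaveletsNetwork | OCRTextCutter.py | getPercentageValue
-- ===== SOURCE A (Python) =====
-- def getPercentageValue(ht, lb, ub):
--    lbW          = 0
--    found       = False
--    while lbW <= 257 and not(found):
--       lbW = lbW +1
--       erg = sum(ht[lbW: ])
--       if lb <= erg <= ub:
--          found=True
--
--    return(lbW)
-- ===== SOURCE B (Python) =====
-- def getPercentageValue(ht, lb, ub):
--     # maintain the suffix sum incrementally: one pass instead of re-summing each step
--     s = sum(ht[1:])
--     for lbW in range(1, 258):
--         if lb <= s <= ub: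
--             return lbW
--         if lbW < len(ht):
--             s -= ht[lbW]
--     return 258
-- ===== Notes on version B (the rewrite author's own statement) =====
-- stated objective: faster
-- what changed: A re-sums the whole suffix ht[lbW:] at every step of its while-loop; B computes the suffix sum once and updates it incrementally (subtracting one element per step) in a single scan.
import Mathlib
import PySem

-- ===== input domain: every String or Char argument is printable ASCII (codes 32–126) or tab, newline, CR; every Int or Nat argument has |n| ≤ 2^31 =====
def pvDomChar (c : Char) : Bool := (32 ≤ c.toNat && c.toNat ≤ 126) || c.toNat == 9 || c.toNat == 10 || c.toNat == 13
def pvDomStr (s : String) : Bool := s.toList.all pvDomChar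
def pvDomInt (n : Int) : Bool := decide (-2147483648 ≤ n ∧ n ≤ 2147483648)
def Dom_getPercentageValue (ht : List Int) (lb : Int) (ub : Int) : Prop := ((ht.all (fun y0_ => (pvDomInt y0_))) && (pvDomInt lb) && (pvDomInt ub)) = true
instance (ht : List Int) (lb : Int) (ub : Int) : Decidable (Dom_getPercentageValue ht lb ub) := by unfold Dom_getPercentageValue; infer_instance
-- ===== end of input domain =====

-- B replaces A's per-step re-summation of the suffix ht[lbW:] by one incrementally
-- maintained suffix sum (objective: faster by a constant/asymptotic-in-k mechanism).

-- ===== PORT A =====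
-- A's while-loop: lbW starts at 0 (always ≥ 0, so carried as a Nat and cast on return),
-- each iteration increments lbW, re-sums the slice ht[lbW:], and sets `found`.
def pvALoop (ht : List Int) (lb ub : Int) (lbW : Nat) (found : Bool) : Nat :=
  if lbW ≤ 257 ∧ found = false then
    let lbW' := lbW + 1
    let erg := (PySem.List.slice ht (some (lbW' : Int)) none).sum
    pvALoop ht lb ub lbW' (decide (lb ≤ erg ∧ erg ≤ ub))
  else lbW
termination_by 258 - lbW
decreasing_by omega

def getPercentageValue (ht : List Int) (lb : Int) (ub : Int) : Int :=
  (pvALoop ht lb ub 0 false : Int)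

-- ===== PORT B =====
-- B's for-loop over lbW = 1..257 carrying the running suffix sum s = sum(ht[lbW:]);
-- ht[lbW] is read only under the guard lbW < len(ht), so getD is exact there.
def pvBLoop (ht : List Int) (lb ub : Int) (s : Int) (lbW : Nat) : Int :=
  if lbW < 258 then
    if lb ≤ s ∧ s ≤ ub then (lbW : Int)
    else pvBLoop ht lb ub (if lbW < ht.length then s - ht.getD lbW 0 else s) (lbW + 1)
  else 258
termination_by 258 - lbW
decreasing_by omega

def getPercentageValue_alt (ht : List Int) (lb : Int) (ub : Int) : Int :=
  pvBLoop ht lb ub (PySem.List.slice ht (some 1) none).sum 1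

-- ===== PRECONDITION & SPEC =====
def Spec_getPercentageValue (ht : List Int) (lb : Int) (ub : Int) (out : Int) : Prop := out = getPercentageValue_alt ht lb ub
instance (ht : List Int) (lb : Int) (ub : Int) (out : Int) : Decidable (Spec_getPercentageValue ht lb ub out) := by unfold Spec_getPercentageValue; infer_instance

-- ===== CLAIM (what is proved, stated in full; the proofs are below) =====
def Claim_equal_getPercentageValue : Prop := ∀ (ht : List Int) (lb : Int) (ub : Int), Dom_getPercentageValue ht lb ub → Spec_getPercentageValue ht lb ub (getPercentageValue ht lb ub)

-- ===== LEMMAS AND PROOFS =====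

-- one incremental update step of B's suffix sum is exact
lemma dropSum_step (ht : List Int) (j : Nat) :
    (if j < ht.length then (ht.drop j).sum - ht.getD j 0 else (ht.drop j).sum)
      = (ht.drop (j + 1)).sum := by
  by_cases h : j < ht.length
  · rw [if_pos h, List.getD_eq_getElem ht 0 h, List.drop_eq_getElem_cons h, List.sum_cons]
    ring
  · simp only [h, if_neg, not_false_iff]
    have h1 : ht.length ≤ j := by omega
    rw [List.drop_eq_nil_of_le h1, List.drop_eq_nil_of_le (by omega)]

lemma loop_eq (ht : List Int) (lb ub : Int) :
    ∀ n k, 258 - k ≤ n → k ≤ 257 →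
      (pvALoop ht lb ub k false : Int) = pvBLoop ht lb ub ((ht.drop (k + 1)).sum) (k + 1) := by
  intro n
  induction n with
  | zero => intro k hn hk; omega
  | succ n ih =>
    intro k hn hk
    rw [pvALoop]
    simp only [hk, and_true, if_pos]
    have herg : (PySem.List.slice ht (some ((k + 1 : Nat) : Int)) none).sum
        = (ht.drop (k + 1)).sum := by
      rw [PySem.List.slice_from_natCast]
    by_cases hk257 : k = 257
    · subst hk257
      rw [pvALoop, pvBLoop]
      split <;> simp_all
    · -- k ≤ 256, so B's loop condition k+1 < 258 holds
      rw [pvBLoop]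
      have hlt : k + 1 < 258 := by omega
      simp only [hlt, if_pos]
      set erg := (PySem.List.slice ht (some ((k + 1 : Nat) : Int)) none).sum with herg_def
      by_cases hp : lb ≤ erg ∧ erg ≤ ub
      · -- found: A exits with lbW = k+1; B returns k+1
        have : decide (lb ≤ erg ∧ erg ≤ ub) = true := by simp [hp]
        rw [this, pvALoop]
        simp only [Bool.true_eq_false, and_false, if_neg, not_false_iff]
        rw [herg] at hp
        simp [hp]
      · have hd : decide (lb ≤ erg ∧ erg ≤ ub) = false := by simp [hp]
        rw [hd]
        rw [herg] at hp
        simp only [hp, if_neg, not_false_iff]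
        rw [ih (k + 1) (by omega) (by omega), dropSum_step]

-- ===== VERDICT (by name: the statement is the Claim_ definition above) =====
theorem getPercentageValue_spec : Claim_equal_getPercentageValue := by
  intro ht lb ub _
  unfold Spec_getPercentageValue getPercentageValue getPercentageValue_alt
  have h := loop_eq ht lb ub 258 0 (by omega) (by omega)
  simpa [PySem.List.slice_from_one, List.drop_one] using h
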